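-- pv_equiv track=rewrite | github.com/MQuaresma/GoogleHashCode2019 | main.py | interest
-- ===== SOURCE A (Python) =====
-- def interest(tags1, tags2):
--     commons = 0
--     s1 = 0
--     s2 = 0
--
--     for t1 in tags1:
--         flag = False
--         s1 += 1
--         for t2 in tags2:
--             if t1==t2:
--                 flag = True
--                 break
--         if flag:
--             commons += 1
--
--     s1 -= commons
--     s2 = len(tags2) - commons
--
--     return min([s1,s2,commons])
-- ===== SOURCE B (Python) =====
-- def interest(tags1, tags2):
--     a = sorted(tags1)
--     b = sorted(tags2)
--     n = len(b)
--     commons = 0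
--     j = 0
--     for x in a:
--         while j < n and b[j] < x:
--             j += 1
--         if j < n and b[j] == x:
--             commons += 1
--     return min([len(tags1) - commons, len(tags2) - commons, commons])
-- ===== Notes on version B (the rewrite author's own statement) =====
-- stated objective: faster
-- what changed: Replaces A's nested element-by-element scans by sort-then-merge: both lists are sorted and a single two-pointer merge scan counts the elements of tags1 that occur in tags2.
import Mathlib
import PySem

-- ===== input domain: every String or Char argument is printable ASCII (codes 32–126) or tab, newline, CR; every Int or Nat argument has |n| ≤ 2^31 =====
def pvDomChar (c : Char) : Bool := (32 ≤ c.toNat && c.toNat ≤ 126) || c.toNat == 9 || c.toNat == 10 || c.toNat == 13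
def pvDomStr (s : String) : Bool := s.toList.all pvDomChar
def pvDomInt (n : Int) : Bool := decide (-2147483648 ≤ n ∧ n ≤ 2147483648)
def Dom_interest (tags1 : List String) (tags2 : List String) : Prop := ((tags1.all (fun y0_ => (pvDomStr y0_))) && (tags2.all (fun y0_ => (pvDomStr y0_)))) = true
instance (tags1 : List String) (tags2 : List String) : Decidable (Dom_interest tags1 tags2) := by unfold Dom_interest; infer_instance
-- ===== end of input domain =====

-- B replaces A's nested membership scans by sort-then-merge: sort both lists and count commons in one two-pointer merge pass (objective: faster).

-- ===== PORT A =====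
-- inner loop 'for t2 in tags2: if t1==t2: flag=True; break'
def interestInner (t1 : String) : List String → Bool
  | [] => false
  | t2 :: rest => if t1 == t2 then true else interestInner t1 rest

-- outer loop body: state (commons, s1)
def interestStep (tags2 : List String) (st : Int × Int) (t1 : String) : Int × Int :=
  let flag := interestInner t1 tags2
  let s1' := st.2 + 1
  if flag then (st.1 + 1, s1') else (st.1, s1')

def interest (tags1 : List String) (tags2 : List String) : Int :=
  let st := tags1.foldl (interestStep tags2) (0, 0)
  let commons := st.1
  let s1 := st.2 - commons
  let s2 := (tags2.length : Int) - commons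
  min (min s1 s2) commons

-- ===== PORT B =====
-- the merge scan of Source B: the pointer j into the sorted list b is represented by the
-- remaining suffix of b; 'while j < n and b[j] < x: j += 1' is exactly dropWhile (· < x)
def mergeCount : List String → List String → Int
  | [], _ => 0
  | x :: a, b =>
    let b' := b.dropWhile (fun y => decide (y < x))
    (if b'.head? = some x then 1 else 0) + mergeCount a b'

def interest_alt (tags1 : List String) (tags2 : List String) : Int :=
  let a := PySem.List.sorted tags1 (fun s => s) false
  let b := PySem.List.sorted tags2 (fun s => s) false
  let commons := mergeCount a b
  min (min ((tags1.length : Int) - commons) ((tags2.length : Int) - commons)) commons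

-- ===== PRECONDITION & SPEC =====
def Spec_interest (tags1 : List String) (tags2 : List String) (out : Int) : Prop := out = interest_alt tags1 tags2
instance (tags1 : List String) (tags2 : List String) (out : Int) : Decidable (Spec_interest tags1 tags2 out) := by unfold Spec_interest; infer_instance

-- ===== CLAIM (what is proved, stated in full; the proofs are below) =====
def Claim_equal_interest : Prop := ∀ (tags1 : List String) (tags2 : List String), Dom_interest tags1 tags2 → Spec_interest tags1 tags2 (interest tags1 tags2)

-- ===== LEMMAS AND PROOFS =====

theorem interestInner_eq_mem (t1 : String) (l : List String) :
    interestInner t1 l = decide (t1 ∈ l) := by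
  induction l with
  | nil => simp [interestInner]
  | cons h t ih => by_cases he : t1 = h <;> simp [interestInner, he, ih]

theorem interest_fold (tags2 : List String) :
    ∀ (l : List String) (c s : Int),
      l.foldl (interestStep tags2) (c, s)
      = (c + (l.countP (fun t1 => decide (t1 ∈ tags2)) : Int), s + l.length) := by
  intro l
  induction l with
  | nil => simp
  | cons h t ih =>
    intro c s
    rw [List.foldl_cons]
    by_cases hm : h ∈ tags2
    · have hstep : interestStep tags2 (c, s) h = (c + 1, s + 1) := by
        simp [interestStep, interestInner_eq_mem, hm]
      rw [hstep, ih]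
      simp only [List.countP_cons, List.length_cons, Prod.mk.injEq]
      simp [hm]; omega
    · have hstep : interestStep tags2 (c, s) h = (c, s + 1) := by
        simp [interestStep, interestInner_eq_mem, hm]
      rw [hstep, ih]
      simp only [List.countP_cons, List.length_cons, Prod.mk.injEq]
      simp [hm]; omega

-- in a sorted b, the merge test 'head of dropWhile (· < x) equals x' is exactly membership of x
theorem head_dropWhile_eq_iff_mem (x : String) (b : List String) (hb : b.Pairwise (· ≤ ·)) :
    ((b.dropWhile (fun y => decide (y < x))).head? = some x) ↔ x ∈ b := by
  constructor
  · intro h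
    exact (List.dropWhile_sublist _).subset (List.mem_of_mem_head? h)
  · intro hx
    set b' := b.dropWhile (fun y => decide (y < x)) with hb'
    have hxb' : x ∈ b' := by
      have := List.takeWhile_append_dropWhile (p := fun y => decide (y < x)) (l := b)
      rcases (List.mem_append.mp (by rw [this]; exact hx)) with hL | hR
      · have hxx := List.mem_takeWhile_imp hL
        simp at hxx
      · exact hR
    cases hh : b'.head? with
    | none => simp [List.head?_eq_none_iff.mp hh] at hxb'
    | some h =>
      -- h is the head of b': ¬ h < x, and (sorted) h ≤ every element, so h ≤ x
      have hnlt : ¬ h < x := by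
        have := List.head?_dropWhile_not (p := fun y => decide (y < x)) (l := b)
        rw [← hb'] at this
        simpa [hh] using this
      have hb'sorted : b'.Pairwise (· ≤ ·) := hb.sublist (List.dropWhile_sublist _)
      obtain ⟨t, ht⟩ := List.head?_eq_some_iff.mp hh
      have hle : h ≤ x := by
        rw [ht] at hxb' hb'sorted
        rcases List.mem_cons.mp hxb' with rfl | hxt
        · exact le_refl _
        · exact (List.pairwise_cons.mp hb'sorted).1 x hxt
      have : h = x := le_antisymm hle (not_lt.mp hnlt)
      exact congrArg some this

-- elements ≥ x keep their b-membership after the merge pointer advances past elements < x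
theorem mem_dropWhile_iff_of_ge (x y : String) (hxy : x ≤ y) (b : List String) :
    (y ∈ b.dropWhile (fun z => decide (z < x))) ↔ y ∈ b := by
  constructor
  · intro h; exact (List.dropWhile_sublist _).subset h
  · intro hy
    have := List.takeWhile_append_dropWhile (p := fun z => decide (z < x)) (l := b)
    rcases (List.mem_append.mp (by rw [this]; exact hy)) with hL | hR
    · have hyx := List.mem_takeWhile_imp hL
      simp only [decide_eq_true_eq] at hyx
      exact absurd (lt_of_lt_of_le hyx hxy) (lt_irrefl y)
    · exact hR

-- merge scan over two sorted lists = per-element membership count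
theorem mergeCount_eq :
    ∀ (a b : List String), a.Pairwise (· ≤ ·) → b.Pairwise (· ≤ ·) →
      mergeCount a b = (a.countP (fun y => decide (y ∈ b)) : Int) := by
  intro a
  induction a with
  | nil => intro b _ _; simp [mergeCount]
  | cons x a' ih =>
    intro b ha hb
    have hx_le : ∀ y ∈ a', x ≤ y := (List.pairwise_cons.mp ha).1
    have ha' : a'.Pairwise (· ≤ ·) := (List.pairwise_cons.mp ha).2
    set b' := b.dropWhile (fun y => decide (y < x)) with hb'def
    have hb' : b'.Pairwise (· ≤ ·) := hb.sublist (List.dropWhile_sublist _)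
    have hcnt : a'.countP (fun y => decide (y ∈ b')) = a'.countP (fun y => decide (y ∈ b)) := by
      apply List.countP_congr
      intro y hy
      rw [hb'def]
      simp only [decide_eq_true_eq]
      exact mem_dropWhile_iff_of_ge x y (hx_le y hy) b
    rw [mergeCount, ← hb'def, ih b' ha' hb', hcnt, List.countP_cons]
    by_cases hm : x ∈ b
    · rw [if_pos ((head_dropWhile_eq_iff_mem x b hb).mpr hm)]
      simp [hm]; omega
    · rw [if_neg (fun h => hm ((head_dropWhile_eq_iff_mem x b hb).mp h))]
      simp [hm]

-- B's commons equals A's commons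
theorem commons_alt_eq (tags1 tags2 : List String) :
    mergeCount (PySem.List.sorted tags1 (fun s => s) false)
               (PySem.List.sorted tags2 (fun s => s) false)
    = (tags1.countP (fun t1 => decide (t1 ∈ tags2)) : Int) := by
  have ha := PySem.List.sorted_pairwise tags1 (fun s => s)
  have hb := PySem.List.sorted_pairwise tags2 (fun s => s)
  rw [mergeCount_eq _ _ ha hb]
  congr 1
  have hperm := PySem.List.sorted_perm tags1 (fun s => s) false
  rw [hperm.countP_eq]
  apply List.countP_congr
  intro y _
  simp [PySem.List.mem_sorted]

-- ===== VERDICT (by name: the statement is the Claim_ definition above) =====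
theorem interest_spec : Claim_equal_interest := by
  intro tags1 tags2 _
  unfold Spec_interest
  simp only [interest, interest_alt, interest_fold tags2 tags1 0 0, commons_alt_eq]
  omega
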